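-- pv_equiv track=rewrite | github.com/JoelleSlmn-SU/Aeropt2 | FileRW/Mesh.py | reindex_subset
-- ===== SOURCE A (Python) =====
-- def reindex_subset(full_list, rem_list):
--     """
--         reindexes a set of inputs. removes rem_list from full_list and
--         returns the new list along with a gl_to_lc converter to convert
--         from something that uses full list to needing to use sub_list.
--     """
--     gl_to_lc = {}
--     sub_list = []
--     for i, x in enumerate(full_list):
--         if i in rem_list:
--             continue
--         gl_to_lc[i] = len(sub_list)
--         sub_list.append(x)
--     return sub_list, gl_to_lc
-- ===== SOURCE B (Python) =====
-- def reindex_subset(full_list, rem_list):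
--     """Dual strategy to A: instead of keeping survivors while scanning full_list,
--     start from the full data and DELETE the doomed positions (distinct in-range
--     entries of rem_list, processed in decreasing order so earlier deletions do
--     not shift later ones), then pair the surviving global indices with 0,1,2,..."""
--     n = len(full_list)
--     doomed = sorted({r for r in rem_list if 0 <= r < n}, reverse=True)
--     sub_list = list(full_list)
--     survivors = list(range(n))
--     for r in doomed:
--         del sub_list[r]
--         del survivors[r]
--     return sub_list, dict(zip(survivors, range(len(survivors))))
-- ===== Notes on version B (the rewrite author's own statement) =====
-- stated objective: alternative
-- what changed: Replaces A's accumulate-survivors scan (one fused loop growing sub_list and the map together) with the dual deletion algorithm: the distinct in-range removal indices are sorted in decreasing order and deleted in place from a copy of full_list and from the index list range(n); the map is then the surviving indices zipped with 0..k-1.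
import Mathlib
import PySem

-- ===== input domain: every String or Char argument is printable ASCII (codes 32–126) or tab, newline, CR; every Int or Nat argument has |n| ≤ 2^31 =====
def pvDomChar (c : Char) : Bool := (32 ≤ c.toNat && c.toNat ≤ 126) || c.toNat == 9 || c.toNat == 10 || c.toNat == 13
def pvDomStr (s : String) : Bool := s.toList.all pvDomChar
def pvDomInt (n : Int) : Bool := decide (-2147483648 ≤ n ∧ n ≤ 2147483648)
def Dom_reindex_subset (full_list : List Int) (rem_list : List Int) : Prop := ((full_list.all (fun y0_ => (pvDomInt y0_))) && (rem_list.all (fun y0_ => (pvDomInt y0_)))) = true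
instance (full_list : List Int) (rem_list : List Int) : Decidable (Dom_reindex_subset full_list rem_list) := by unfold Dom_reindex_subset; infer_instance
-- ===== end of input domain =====

-- B replaces A's accumulate-survivors scan by the dual deletion algorithm (delete the distinct
-- in-range removal indices, largest first, from copies of the data and of range(n)); equal
-- return values are proved on the whole domain (alternative algorithm, no speed claim).

-- ===== PORT A =====
-- A's single loop over enumerate(full_list); the dict keys i are pairwise distinct
-- (indices strictly increase), so each dict insertion appends a fresh (i, len(sub_list)) pair.
def reindexLoop (rem : List Int) : List (Int × Int) → List (Int × Int) → List Int → List Int × List (Int × Int)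
  | [], gl, sub => (sub, gl)
  | (i, x) :: rest, gl, sub =>
    if i ∈ rem then reindexLoop rem rest gl sub
    else reindexLoop rem rest (gl ++ [(i, (sub.length : Int))]) (sub ++ [x])

def reindex_subset (full_list : List Int) (rem_list : List Int) : List Int × (List (Int × Int)) :=
  reindexLoop rem_list (PySem.List.enumerate full_list 0) [] []

-- ===== PORT B =====
-- doomed = sorted({r for r in rem_list if 0 <= r < n}, reverse=True); a sorted() of a set of
-- ints is order-independent, the set is PySem.Set.ofList of the filtered list.
-- The loop 'for r in doomed: del sub_list[r]; del survivors[r]' is a fold over the pair state;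
-- each r satisfies 0 ≤ r < current length, so 'del xs[r]' is exactly xs.eraseIdx r.toNat.
-- dict(zip(survivors, range(len(survivors)))): survivors are distinct, so the dict is the zip.
def doomedB (full_list : List Int) (rem_list : List Int) : List Int :=
  PySem.List.sorted
    (PySem.Set.ofList (rem_list.filter (fun r => decide (0 ≤ r) && decide (r < (full_list.length : Int)))))
    (fun x => x) true

def finishB (p : List Int × List Int) : List Int × (List (Int × Int)) :=
  (p.1, p.2.zip (PySem.List.pyRange 0 (p.2.length : Int) 1))

def reindex_subset_alt (full_list : List Int) (rem_list : List Int) : List Int × (List (Int × Int)) :=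
  finishB ((doomedB full_list rem_list).foldl
    (fun s r => (s.1.eraseIdx r.toNat, s.2.eraseIdx r.toNat))
    (full_list, PySem.List.pyRange 0 (full_list.length : Int) 1))

-- ===== PRECONDITION & SPEC =====
def Spec_reindex_subset (full_list : List Int) (rem_list : List Int) (out : List Int × (List (Int × Int))) : Prop := out = reindex_subset_alt full_list rem_list
instance (full_list : List Int) (rem_list : List Int) (out : List Int × (List (Int × Int))) : Decidable (Spec_reindex_subset full_list rem_list out) := by unfold Spec_reindex_subset; infer_instance

-- ===== CLAIM (what is proved, stated in full; the proofs are below) =====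
def Claim_equal_reindex_subset : Prop := ∀ (full_list : List Int) (rem_list : List Int), Dom_reindex_subset full_list rem_list → Spec_reindex_subset full_list rem_list (reindex_subset full_list rem_list)

-- ===== LEMMAS AND PROOFS =====

-- enumerate-with-swapped-pairs is zip with a consecutive range (bridges A's dict to B's zip).
theorem swap_enumerate_eq_zip (l : List Int) :
    ∀ (s : Int), (PySem.List.enumerate l s).map Prod.swap
      = l.zip (PySem.List.pyRange s (s + (l.length : Int)) 1) := by
  induction l with
  | nil =>
    intro s
    simp [PySem.List.enumerate_nil]
  | cons y ys ih =>
    intro s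
    have hb : s < s + ((ys.length : Int) + 1) := by
      have : (0:Int) ≤ (ys.length : Int) := Int.natCast_nonneg _
      omega
    have harith : s + (((ys.length + 1 : Nat)) : Int) = s + ((ys.length : Int) + 1) := by
      push_cast; ring
    rw [PySem.List.enumerate_cons, List.map_cons, List.length_cons, harith,
      PySem.List.pyRange_one_cons hb, List.zip_cons_cons, ih (s + 1)]
    have : s + 1 + (ys.length : Int) = s + ((ys.length : Int) + 1) := by ring
    rw [this]
    rfl

-- A's loop unfolded: it appends the filtered seconds to sub and the filtered firsts paired
-- with consecutive local indices (starting at len(sub)) to gl.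
theorem reindexLoop_eq (rem : List Int) (L : List (Int × Int)) :
    ∀ (gl : List (Int × Int)) (sub : List Int),
    reindexLoop rem L gl sub =
      (sub ++ (L.filter (fun p => p.1 ∉ rem)).map (·.2),
       gl ++ (PySem.List.enumerate ((L.filter (fun p => p.1 ∉ rem)).map (·.1))
         (sub.length : Int)).map Prod.swap) := by
  induction L with
  | nil => intro gl sub; simp [reindexLoop]
  | cons p rest ih =>
    intro gl sub
    obtain ⟨i, x⟩ := p
    by_cases h : i ∈ rem
    · simp [reindexLoop, h, ih]
    · have e1 : reindexLoop rem ((i, x) :: rest) gl sub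
          = reindexLoop rem rest (gl ++ [(i, (sub.length : Int))]) (sub ++ [x]) := by
        simp [reindexLoop, h]
      rw [e1, ih]
      simp [h, PySem.List.enumerate_cons, List.append_assoc]

-- enumerating a pair list whose indices all lie above every element of D filters nothing out.
theorem filter_enumerate_high {α : Type} (ys : List α) (s : Int) (D : List Int)
    (h : ∀ d ∈ D, d < s) :
    (PySem.List.enumerate ys s).filter (fun p => decide (p.1 ∉ D))
      = PySem.List.enumerate ys s := by
  apply List.filter_eq_self.mpr
  intro p hp
  rw [PySem.List.mem_enumerate_iff] at hp
  obtain ⟨k, hk, rfl⟩ := hp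
  simp only [decide_eq_true_eq]
  intro hmem
  have := h _ hmem
  have : (0:Int) ≤ (k : Int) := Int.natCast_nonneg _
  omega

-- the deletion loop: erasing a strictly decreasing list of in-range positions keeps exactly
-- the entries whose index is outside that list.
theorem eraseFold_eq (D : List Int) :
    ∀ (xs : List Int), D.Pairwise (· > ·) → (∀ d ∈ D, 0 ≤ d ∧ d < (xs.length : Int)) →
    D.foldl (fun ys r => ys.eraseIdx r.toNat) xs
      = ((PySem.List.enumerate xs 0).filter (fun p => decide (p.1 ∉ D))).map (·.2) := by
  induction D with
  | nil =>
    intro xs _ _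
    simp [PySem.List.map_snd_enumerate]
  | cons d D' ih =>
    intro xs hpair hbd
    obtain ⟨hd0, hdn⟩ := hbd d (List.mem_cons_self ..)
    obtain ⟨hlt, hpair'⟩ := List.pairwise_cons.mp hpair
    have hk : d.toNat < xs.length := by omega
    have hdk : ((d.toNat : Nat) : Int) = d := by omega
    have hlen : (xs.eraseIdx d.toNat).length = xs.length - 1 := by
      rw [List.length_eraseIdx_of_lt hk]
    have ih' := ih (xs.eraseIdx d.toNat) hpair' (by
      intro d' hd'
      obtain ⟨h0, _⟩ := hbd d' (List.mem_cons_of_mem _ hd')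
      have := hlt d' hd'
      rw [hlen]
      constructor
      · exact h0
      · omega)
    rw [List.foldl_cons, ih']
    -- decompose xs around position d.toNat
    have hx : xs = xs.take d.toNat ++ xs[d.toNat] :: xs.drop (d.toNat + 1) := by
      conv_lhs => rw [← List.take_append_drop d.toNat xs]
      rw [List.drop_eq_getElem_cons hk]
    have htlen : (xs.take d.toNat).length = d.toNat := List.length_take_of_le (by omega)
    have hpre' :
        (PySem.List.enumerate (xs.take d.toNat) 0).filter (fun p => decide (p.1 ∉ (d :: D')))
          = (PySem.List.enumerate (xs.take d.toNat) 0).filter (fun p => decide (p.1 ∉ D')) := by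
      apply List.filter_congr
      intro p hp
      rw [PySem.List.mem_enumerate_iff] at hp
      obtain ⟨k, hk', rfl⟩ := hp
      have hklt : (k : Int) < d := by
        have := hk'
        rw [htlen] at this
        omega
      simp only [decide_eq_decide, List.mem_cons, not_or]
      constructor
      · rintro ⟨_, h2⟩; exact h2
      · intro h2; exact ⟨by omega, h2⟩
    have hhigh1 : (PySem.List.enumerate (xs.drop (d.toNat + 1)) (0 + (d.toNat : Int))).filter
        (fun p => decide (p.1 ∉ D'))
        = PySem.List.enumerate (xs.drop (d.toNat + 1)) (0 + (d.toNat : Int)) :=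
      filter_enumerate_high _ _ _ (by intro e he; have := hlt e he; omega)
    have hdrop : (((d, xs[d.toNat]) : Int × Int) :: PySem.List.enumerate (xs.drop (d.toNat + 1)) (d + 1)).filter
        (fun p => decide (p.1 ∉ (d :: D')))
        = PySem.List.enumerate (xs.drop (d.toNat + 1)) (d + 1) := by
      rw [List.filter_cons]
      simp only [List.mem_cons, not_or, decide_eq_true_eq]
      rw [if_neg (by simp)]
      apply List.filter_eq_self.mpr
      intro p hp
      rw [PySem.List.mem_enumerate_iff] at hp
      obtain ⟨k, hk', rfl⟩ := hp
      simp only [decide_eq_true_eq]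
      have h0k : (0:Int) ≤ (k:Int) := Int.natCast_nonneg _
      constructor
      · omega
      · intro hmem
        have := hlt _ hmem
        omega
    have harg : (0:Int) + (d.toNat : Int) = d := by omega
    -- original (right-hand) side: split at position d, drop the (d, x) entry
    conv_rhs => rw [hx, PySem.List.enumerate_append, htlen, List.filter_append, hpre', harg,
      PySem.List.enumerate_cons, hdrop]
    -- erased (left-hand) side: split the erased list, suffix filters nothing out
    conv_lhs => rw [List.eraseIdx_eq_take_drop_succ, PySem.List.enumerate_append, htlen,
      List.filter_append, hhigh1]
    simp [PySem.List.map_snd_enumerate]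

-- enumerate of a consecutive range pairs every element with itself.
theorem enumerate_pyRange_dup (n : Int) (hn : 0 ≤ n) :
    PySem.List.enumerate (PySem.List.pyRange 0 n 1) 0
      = (PySem.List.pyRange 0 n 1).map (fun i => (i, i)) := by
  have hlen : ((PySem.List.pyRange 0 n 1).length : Int) = n := by
    rw [PySem.List.length_pyRange_one]; omega
  rw [PySem.List.enumerate_eq_map_pyRange (PySem.List.pyRange 0 n 1) 0, PySem.List.len_eq, hlen]
  apply List.map_congr_left
  intro j hj
  rw [PySem.List.mem_pyRange_one] at hj
  congr 1
  have := PySem.List.pyGetD_map_pyRange_of_nonneg (fun i => i) n j 0 hj.1 hj.2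
  simpa using this

theorem reindex_subset_eq_alt (full_list rem_list : List Int) :
    reindex_subset full_list rem_list = reindex_subset_alt full_list rem_list := by
  unfold reindex_subset reindex_subset_alt finishB
  set n : Int := (full_list.length : Int) with hn
  set doomed := doomedB full_list rem_list with hdoomed
  -- membership in doomed
  have hmem : ∀ d, d ∈ doomed ↔ (0 ≤ d ∧ d < n ∧ d ∈ rem_list) := by
    intro d
    rw [hdoomed]; unfold doomedB
    rw [PySem.List.mem_sorted, PySem.Set.mem_ofList, List.mem_filter]
    rw [← hn]
    simp only [Bool.and_eq_true, decide_eq_true_eq]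
    tauto
  -- doomed is strictly decreasing
  have hdesc : doomed.Pairwise (· > ·) := by
    have hge : doomed.Pairwise (fun a b => (fun x => x) b ≤ (fun x => x) a) := by
      rw [hdoomed]; unfold doomedB; exact PySem.List.sorted_pairwise_rev _ _
    have hnd : doomed.Nodup := by
      rw [hdoomed]; unfold doomedB
      have hperm := PySem.List.sorted_perm
        (PySem.Set.ofList (rem_list.filter (fun r => decide (0 ≤ r) && decide (r < (full_list.length : Int)))))
        (fun x => x) true
      exact hperm.nodup_iff.mpr (PySem.Set.nodup_ofList _)
    exact (hnd.and hge).imp (fun h => lt_of_le_of_ne h.2 h.1.symm)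
  have hbd : ∀ d ∈ doomed, 0 ≤ d ∧ d < n := by
    intro d hd; have := (hmem d).mp hd; exact ⟨this.1, this.2.1⟩
  -- split the pair fold
  have hsplit := PySem.List.foldl_prod_mk (fun ys (r : Int) => ys.eraseIdx r.toNat)
    (fun ys (r : Int) => ys.eraseIdx r.toNat) doomed full_list (PySem.List.pyRange 0 n 1)
  rw [hsplit]
  -- A's loop
  rw [reindexLoop_eq]
  simp only [List.nil_append, List.length_nil, Nat.cast_zero]
  -- B's sub_list = A's sub_list
  have hsub : doomed.foldl (fun ys r => ys.eraseIdx r.toNat) full_list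
      = ((PySem.List.enumerate full_list 0).filter (fun p => p.1 ∉ rem_list)).map (·.2) := by
    rw [eraseFold_eq doomed full_list hdesc hbd]
    congr 1
    apply List.filter_congr
    intro p hp
    rw [PySem.List.mem_enumerate_iff] at hp
    obtain ⟨k, hk, rfl⟩ := hp
    simp only [decide_eq_decide, hmem]
    have h0 : (0:Int) ≤ 0 + (k:Int) := by positivity
    have h1 : 0 + (k:Int) < n := by rw [hn]; omega
    tauto
  -- B's survivors = A's kept indices
  have hsurv : doomed.foldl (fun ys r => ys.eraseIdx r.toNat) (PySem.List.pyRange 0 n 1)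
      = ((PySem.List.enumerate full_list 0).filter (fun p => p.1 ∉ rem_list)).map (·.1) := by
    have hbdr : ∀ d ∈ doomed, 0 ≤ d ∧ d < ((PySem.List.pyRange 0 n 1).length : Int) := by
      intro d hd
      have := hbd d hd
      rw [PySem.List.length_pyRange_one]
      constructor
      · exact this.1
      · have hn0 : 0 ≤ n := by rw [hn]; positivity
        omega
    have hfst : PySem.List.pyRange 0 n 1 = (PySem.List.enumerate full_list 0).map (·.1) := by
      rw [PySem.List.map_fst_enumerate, hn]; norm_num
    have hleft : doomed.foldl (fun ys r => ys.eraseIdx r.toNat) (PySem.List.pyRange 0 n 1)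
        = (PySem.List.pyRange 0 n 1).filter (fun j => decide (j ∉ doomed)) := by
      rw [eraseFold_eq doomed _ hdesc hbdr,
        enumerate_pyRange_dup n (by rw [hn]; positivity), List.filter_map, List.map_map]
      simp [Function.comp_def]
    have hmid : (PySem.List.pyRange 0 n 1).filter (fun j => decide (j ∉ doomed))
        = (PySem.List.pyRange 0 n 1).filter (fun j => decide (j ∉ rem_list)) := by
      apply List.filter_congr
      intro j hj
      rw [PySem.List.mem_pyRange_one] at hj
      simp only [decide_eq_decide, hmem]
      tauto
    have hright : (PySem.List.pyRange 0 n 1).filter (fun j => decide (j ∉ rem_list))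
        = ((PySem.List.enumerate full_list 0).filter (fun p => p.1 ∉ rem_list)).map (·.1) := by
      rw [hfst, List.filter_map]
      rfl
    rw [hleft, hmid, hright]
  rw [hsub, hsurv, swap_enumerate_eq_zip]
  norm_num

-- ===== VERDICT (by name: the statement is the Claim_ definition above) =====
theorem reindex_subset_spec : Claim_equal_reindex_subset := by
  intro full_list rem_list _
  unfold Spec_reindex_subset
  exact reindex_subset_eq_alt full_list rem_list
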